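-- pv_equiv track=rewrite | github.com/malonewalker/bpr-gb-proofing | sl_proofing.py | subsection_between
-- ===== SOURCE A (Python) =====
-- def subsection_between(lines_text, start_kw, end_kws):
--     """Extract text between a start label and the next of several end labels (inclusive of the start line)."""
--     start_idx = next(
--         (i for i, ln in enumerate(lines_text) if start_kw.lower() in ln.lower()),
--         None,
--     )
--     if start_idx is None:
--         return ""
--     end_idx = next(
--         (
--             j
--             for j in range(start_idx + 1, len(lines_text))
--             if any(ek.lower() in lines_text[j].lower() for ek in end_kws)
--         ),
--         len(lines_text),
--     )
--     return "\n".join(s.strip() for s in lines_text[start_idx:end_idx])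
-- ===== SOURCE B (Python) =====
-- def subsection_between(lines_text, start_kw, end_kws):
--     """Extract text between a start label and the next of several end labels (inclusive of the start line)."""
--     started = False
--     out = []
--     for line in lines_text:
--         if not started:
--             if start_kw.lower() in line.lower():
--                 started = True
--                 out.append(line.strip())
--         else:
--             if any(ek.lower() in line.lower() for ek in end_kws):
--                 break
--             out.append(line.strip())
--     if not started:
--         return ""
--     return "\n".join(out)
-- ===== Notes on version B (the rewrite author's own statement) =====
-- stated objective: alternative
-- what changed: Replaces the two index searches (enumerate scan for the start, range scan for the end) plus a slice-and-join with a single fused pass over the lines carrying a 'started' flag and a result accumulator.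
import Mathlib
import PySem

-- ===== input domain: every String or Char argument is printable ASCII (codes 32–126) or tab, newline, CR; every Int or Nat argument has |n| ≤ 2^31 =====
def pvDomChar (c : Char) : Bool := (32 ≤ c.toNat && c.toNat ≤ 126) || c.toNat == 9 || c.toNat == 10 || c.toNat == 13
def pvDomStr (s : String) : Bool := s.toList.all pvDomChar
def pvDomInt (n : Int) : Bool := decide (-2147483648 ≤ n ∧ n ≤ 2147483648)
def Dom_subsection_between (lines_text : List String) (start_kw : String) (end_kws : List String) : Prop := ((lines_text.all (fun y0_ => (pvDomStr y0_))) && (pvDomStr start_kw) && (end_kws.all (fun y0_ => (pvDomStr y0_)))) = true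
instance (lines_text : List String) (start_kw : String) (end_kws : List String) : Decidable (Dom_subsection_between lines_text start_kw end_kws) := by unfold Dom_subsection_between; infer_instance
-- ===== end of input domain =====

-- B replaces A's two index searches (enumerate scan for the start index, range scan for the
-- end index) plus slice-and-join by a single fused pass with a 'started' flag and an
-- accumulator of stripped lines (objective: alternative decomposition; same cost).

-- ===== PORT A =====
-- 'start_kw.lower() in ln.lower()'
def pvHitStart (start_kw line : String) : Bool :=
  PySem.Str.isIn (PySem.Str.lower start_kw) (PySem.Str.lower line)

-- 'any(ek.lower() in line.lower() for ek in end_kws)'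
def pvHitEnd (end_kws : List String) (line : String) : Bool :=
  end_kws.any (fun ek => PySem.Str.isIn (PySem.Str.lower ek) (PySem.Str.lower line))

def subsection_between (lines_text : List String) (start_kw : String) (end_kws : List String) : String :=
  -- start_idx = next((i for i, ln in enumerate(lines_text) if …), None)
  match (PySem.List.enumerate lines_text).find? (fun pr => pvHitStart start_kw pr.2) with
  | none => ""
  | some pr =>
    let start_idx : Int := pr.1
    -- end_idx = next((j for j in range(start_idx+1, len(lines_text)) if any(…)), len(lines_text))
    let end_idx : Int :=
      match (PySem.List.pyRange (start_idx + 1) (lines_text.length : Int)).find?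
              (fun j => pvHitEnd end_kws ((PySem.List.pyGet? lines_text j).getD "")) with
      | some j => j
      | none => (lines_text.length : Int)
    -- "\n".join(s.strip() for s in lines_text[start_idx:end_idx])
    PySem.Str.join "\n"
      ((PySem.List.slice lines_text (some start_idx) (some end_idx)).map PySem.Str.strip)

-- ===== PORT B =====
-- the fused loop: state = (started, collected stripped lines); stops at the first end hit
def pvAltLoop (start_kw : String) (end_kws : List String) :
    List String → Bool → List String → Bool × List String
  | [], started, out => (started, out)
  | line :: rest, started, out =>
    if started then
      if pvHitEnd end_kws line then (started, out)
      else pvAltLoop start_kw end_kws rest started (out ++ [PySem.Str.strip line])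
    else if pvHitStart start_kw line then
      pvAltLoop start_kw end_kws rest true (out ++ [PySem.Str.strip line])
    else
      pvAltLoop start_kw end_kws rest started out

def subsection_between_alt (lines_text : List String) (start_kw : String) (end_kws : List String) : String :=
  match pvAltLoop start_kw end_kws lines_text false [] with
  | (started, out) => if started then PySem.Str.join "\n" out else ""

-- ===== PRECONDITION & SPEC =====
def Spec_subsection_between (lines_text : List String) (start_kw : String) (end_kws : List String) (out : String) : Prop := out = subsection_between_alt lines_text start_kw end_kws
instance (lines_text : List String) (start_kw : String) (end_kws : List String) (out : String) : Decidable (Spec_subsection_between lines_text start_kw end_kws out) := by unfold Spec_subsection_between; infer_instance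

-- ===== CLAIM (what is proved, stated in full; the proofs are below) =====
def Claim_equal_subsection_between : Prop := ∀ (lines_text : List String) (start_kw : String) (end_kws : List String), Dom_subsection_between lines_text start_kw end_kws → Spec_subsection_between lines_text start_kw end_kws (subsection_between lines_text start_kw end_kws)

-- ===== LEMMAS AND PROOFS =====

-- common reading of both programs: drop the prefix before the start hit; if nothing is left
-- the result is ""; otherwise join the stripped start line and the stripped lines up to
-- (excluding) the first end hit after it.
def pvSpec (start_kw : String) (end_kws : List String) (lines : List String) : String :=
  match lines.dropWhile (fun ln => !pvHitStart start_kw ln) with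
  | [] => ""
  | l :: tail =>
    PySem.Str.join "\n"
      (PySem.Str.strip l ::
        (tail.takeWhile (fun ln => !pvHitEnd end_kws ln)).map PySem.Str.strip)

theorem pv_take_takeWhile_length {α : Type} (q : α → Bool) (l : List α) :
    l.take (l.takeWhile q).length = l.takeWhile q := by
  induction l with
  | nil => rfl
  | cons x xs ih =>
    by_cases h : q x <;> simp [h, ih]

-- A's start search: find? over enumerate, described by takeWhile/dropWhile
theorem pv_enum_find (skw : String) (lines : List String) (k : Int) :
    (PySem.List.enumerate lines k).find? (fun pr => pvHitStart skw pr.2) =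
      match lines.dropWhile (fun ln => !pvHitStart skw ln) with
      | [] => none
      | l :: _ => some (k + ((lines.takeWhile (fun ln => !pvHitStart skw ln)).length : Int), l) := by
  induction lines generalizing k with
  | nil => simp [PySem.List.enumerate]
  | cons x xs ih =>
    by_cases h : pvHitStart skw x
    · simp [PySem.List.enumerate, h]
    · simp only [PySem.List.enumerate, List.find?, h, List.dropWhile_cons, List.takeWhile_cons,
        Bool.not_false, Bool.not_true, if_true, if_false]
      rw [ih (k + 1)]
      cases hd : xs.dropWhile (fun ln => !pvHitStart skw ln) with
      | nil => simp
      | cons l t => simp; ring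

-- A's end search over range(k, n) with indexing, described by takeWhile on lines.drop k
theorem pv_range_find (ekws : List String) (lines : List String) :
    ∀ (suffix : List String) (k : Nat), k ≤ lines.length → lines.drop k = suffix →
    (match (PySem.List.pyRange (k : Int) (lines.length : Int)).find?
             (fun j => pvHitEnd ekws ((PySem.List.pyGet? lines j).getD "")) with
     | some j => j
     | none => (lines.length : Int))
    = (k : Int) + ((suffix.takeWhile (fun ln => !pvHitEnd ekws ln)).length : Int) := by
  intro suffix
  induction suffix with
  | nil =>
    intro k hklen hk
    have hlen : lines.length ≤ k := by
      by_contra h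
      have := List.drop_eq_nil_iff.mp hk
      omega
    have hr : PySem.List.pyRange (k : Int) (lines.length : Int) = [] := by
      simp [PySem.List.pyRange]
      omega
    simp [hr]
    omega
  | cons l tl ih =>
    intro k hklen hk
    have hk' : k < lines.length := by
      by_contra h
      rw [List.drop_eq_nil_iff.mpr (by omega)] at hk
      exact (List.cons_ne_nil _ _) hk.symm
    have hget : lines[k]?.getD "" = l := by
      have h0 : lines[k + 0]? = (lines.drop k)[0]? := List.getElem?_drop.symm
      simp only [Nat.add_zero] at h0
      rw [h0, hk]; rfl
    rw [PySem.List.pyRange_one_cons (by exact_mod_cast hk')]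
    simp only [List.find?, PySem.List.pyGet?_natCast, hget]
    by_cases h : pvHitEnd ekws l
    · simp [h]
    · have hdrop : lines.drop (k + 1) = tl := by
        have h1 : lines.drop (k + 1) = (lines.drop k).drop 1 := by
          rw [List.drop_drop]
        rw [h1, hk]; rfl
      have hrec := ih (k + 1) (by omega) hdrop
      push_cast at hrec ⊢
      simp only [h]
      rw [show ((k : Int) + 1) = (((k + 1 : Nat)) : Int) by push_cast; ring] at hrec ⊢
      rw [hrec]
      simp [h]
      ring

-- A computes pvSpec
theorem pv_a_eq_spec (lines : List String) (skw : String) (ekws : List String) :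
    subsection_between lines skw ekws = pvSpec skw ekws lines := by
  unfold subsection_between pvSpec
  rw [pv_enum_find skw lines 0]
  cases hd : lines.dropWhile (fun ln => !pvHitStart skw ln) with
  | nil => rfl
  | cons l tail =>
    simp only [zero_add]
    set pre := lines.takeWhile (fun ln => !pvHitStart skw ln) with hpre
    have hsplit : lines = pre ++ l :: tail := by
      rw [hpre, ← hd, List.takeWhile_append_dropWhile]
    set t := (tail.takeWhile (fun ln => !pvHitEnd ekws ln)).length with ht
    have hdrop : lines.drop (pre.length + 1) = tail := by
      rw [hsplit]
      rw [show pre.length + 1 = (pre ++ [l]).length by simp]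
      rw [show pre ++ l :: tail = (pre ++ [l]) ++ tail by simp]
      exact List.drop_left
    have hprelen : pre.length + 1 ≤ lines.length := by
      rw [hsplit]; simp
    have hrange := pv_range_find ekws lines tail (pre.length + 1) hprelen hdrop
    push_cast at hrange
    rw [show ((pre.length : Int) + 1) = ((pre.length : Int)) + 1 by ring] at hrange
    rw [hrange]
    have hslice : PySem.List.slice lines (some (pre.length : Int))
        (some ((pre.length : Int) + 1 + (t : Int))) = l :: tail.takeWhile (fun ln => !pvHitEnd ekws ln) := by
      rw [show ((pre.length : Int) + 1 + (t : Int)) = ((pre.length + 1 + t : Nat) : Int) by push_cast; ring]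
      rw [PySem.List.slice_natCast]
      rw [hsplit, show pre.length + 1 + t - pre.length = 1 + t by omega]
      rw [List.drop_left]
      rw [show (1 + t) = t + 1 by omega]
      simp only [List.take_succ_cons]
      rw [ht, pv_take_takeWhile_length]
    rw [hslice]
    simp

-- B's loop once started collects the stripped lines up to the first end hit
theorem pv_alt_started (skw : String) (ekws : List String) (rest acc : List String) :
    pvAltLoop skw ekws rest true acc =
      (true, acc ++ (rest.takeWhile (fun ln => !pvHitEnd ekws ln)).map PySem.Str.strip) := by
  induction rest generalizing acc with
  | nil => simp [pvAltLoop]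
  | cons x xs ih =>
    by_cases h : pvHitEnd ekws x
    · simp [pvAltLoop, h]
    · simp [pvAltLoop, h, ih]

-- B's loop before the start hit skips lines; full characterization of the loop
theorem pv_alt_loop_eq (skw : String) (ekws : List String) (lines : List String) :
    pvAltLoop skw ekws lines false [] =
      match lines.dropWhile (fun ln => !pvHitStart skw ln) with
      | [] => (false, [])
      | l :: tail =>
        (true, (l :: tail.takeWhile (fun ln => !pvHitEnd ekws ln)).map PySem.Str.strip) := by
  induction lines with
  | nil => rfl
  | cons x xs ih =>
    by_cases h : pvHitStart skw x
    · simp only [pvAltLoop, h, Bool.false_eq_true, if_false, if_true]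
      rw [pv_alt_started]
      simp [h]
    · simp only [pvAltLoop, h, Bool.false_eq_true, if_false]
      rw [ih]
      simp [h]

-- B computes pvSpec
theorem pv_b_eq_spec (lines : List String) (skw : String) (ekws : List String) :
    subsection_between_alt lines skw ekws = pvSpec skw ekws lines := by
  unfold subsection_between_alt pvSpec
  rw [pv_alt_loop_eq]
  cases lines.dropWhile (fun ln => !pvHitStart skw ln) with
  | nil => rfl
  | cons l tail => simp

-- ===== VERDICT (by name: the statement is the Claim_ definition above) =====
theorem subsection_between_spec : Claim_equal_subsection_between := by
  intro lines skw ekws _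
  unfold Spec_subsection_between
  rw [pv_a_eq_spec, pv_b_eq_spec]
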